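-- pv_equiv track=rewrite | github.com/Chiller44/lesson1 | test_os.py | get_words_dict
-- ===== SOURCE A (Python) =====
-- def get_words_dict(words, banned_words):
--     word_dict = dict()
--
--
--     for word in words:
--         if word not in banned_words:
--             if word in word_dict:
--                 word_dict[word] = word_dict[word] + 1
--             else:
--                 word_dict[word] = 1
--
--     return word_dict
-- ===== SOURCE B (Python) =====
-- def get_words_dict(words, banned_words):
--     return {w: words.count(w)
--             for w in dict.fromkeys(words)
--             if w not in banned_words}
-- ===== Notes on version B (the rewrite author's own statement) =====
-- stated objective: idiomatic
-- what changed: Replaces A's single-pass running-accumulator dict with a comprehension over the distinct words (dict.fromkeys) that counts each non-banned word by rescanning the list with words.count.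
import Mathlib
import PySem

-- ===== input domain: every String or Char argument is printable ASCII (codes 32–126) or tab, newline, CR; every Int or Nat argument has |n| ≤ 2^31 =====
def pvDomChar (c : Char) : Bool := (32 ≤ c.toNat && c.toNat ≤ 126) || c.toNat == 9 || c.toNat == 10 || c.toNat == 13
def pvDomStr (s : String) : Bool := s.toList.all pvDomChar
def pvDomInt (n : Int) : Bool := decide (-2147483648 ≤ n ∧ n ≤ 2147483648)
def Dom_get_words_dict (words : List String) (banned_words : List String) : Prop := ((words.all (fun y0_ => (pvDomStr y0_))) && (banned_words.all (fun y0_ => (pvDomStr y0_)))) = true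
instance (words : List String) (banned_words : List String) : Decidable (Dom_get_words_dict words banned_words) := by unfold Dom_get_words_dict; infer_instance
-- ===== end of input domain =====

-- B replaces A's one-pass running-count dict with an idiomatic comprehension over the
-- distinct words (dict.fromkeys) that counts each non-banned word via words.count.

-- ===== PORT A =====
-- literal port of A: fold over `words`, skipping banned words, incrementing or creating the entry
def get_words_dict (words : List String) (banned_words : List String) : List (String × Int) :=
  (words.foldl (fun word_dict word =>
      if word ∉ banned_words then
        if word_dict.contains word then
          word_dict.insert word (word_dict.getD word 0 + 1)
        else
          word_dict.insert word 1
      else word_dict)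
    (PySem.Dict.empty : PySem.Dict String Int)).items

-- ===== PORT B =====
-- literal port of B: distinct words in first-occurrence order, filter banned, count by rescanning
def get_words_dict_alt (words : List String) (banned_words : List String) : List (String × Int) :=
  ((PySem.List.dedup words).filter (fun w => decide (w ∉ banned_words))).map
    (fun w => (w, (words.count w : Int)))

-- ===== PRECONDITION & SPEC =====
def Spec_get_words_dict (words : List String) (banned_words : List String) (out : List (String × Int)) : Prop := out = get_words_dict_alt words banned_words
instance (words : List String) (banned_words : List String) (out : List (String × Int)) : Decidable (Spec_get_words_dict words banned_words out) := by unfold Spec_get_words_dict; infer_instance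

-- ===== CLAIM (what is proved, stated in full; the proofs are below) =====
def Claim_equal_get_words_dict : Prop := ∀ (words : List String) (banned_words : List String), Dom_get_words_dict words banned_words → Spec_get_words_dict words banned_words (get_words_dict words banned_words)

-- ===== LEMMAS AND PROOFS =====

-- PySem.Set.ofList commutes with filter (stated over the underlying foldl with a general accumulator)
theorem ofList_filter_aux {α : Type} [BEq α] [LawfulBEq α] (p : α → Bool) (xs : List α) (s : List α) :
    ((xs.filter p).foldl PySem.Set.add (s.filter p) : List α) = (xs.foldl PySem.Set.add s).filter p := by
  induction xs generalizing s with
  | nil => rfl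
  | cons x t ih =>
    by_cases h : p x = true
    · have hc : PySem.Set.contains (s.filter p) x = PySem.Set.contains s x := by
        simp [PySem.Set.contains, List.mem_filter, h]
      simp only [List.filter_cons, h, if_pos, List.foldl_cons]
      rw [show PySem.Set.add (s.filter p) x = (PySem.Set.add s x).filter p by
        unfold PySem.Set.add; rw [hc]; split <;> simp [List.filter_append, h]]
      exact ih _
    · simp only [List.filter_cons, h, List.foldl_cons]
      rw [show (s.filter p : List α) = (PySem.Set.add s x).filter p by
        unfold PySem.Set.add; split <;> simp [List.filter_append, h]]
      exact ih _

theorem ofList_filter {α : Type} [BEq α] [LawfulBEq α] (p : α → Bool) (xs : List α) :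
    (PySem.Set.ofList (xs.filter p) : List α) = (PySem.Set.ofList xs).filter p :=
  ofList_filter_aux p xs []

-- A's loop body is the standard counter step, guarded by the banned filter
theorem get_words_dict_eq_counter_items (words banned_words : List String) :
    get_words_dict words banned_words =
      (PySem.Dict.counter (words.filter (fun w => decide (w ∉ banned_words)))).items := by
  unfold get_words_dict
  rw [← PySem.Dict.foldl_insert_getD_add_one_eq_counter, List.foldl_filter]
  have hstep : (fun (word_dict : PySem.Dict String Int) word =>
      if word ∉ banned_words then
        if word_dict.contains word then
          word_dict.insert word (word_dict.getD word 0 + 1)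
        else
          word_dict.insert word 1
      else word_dict) =
      (fun (x : PySem.Dict String Int) y =>
        if decide (y ∉ banned_words) = true then x.insert y (x.getD y 0 + 1) else x) := by
    funext d w
    by_cases hb : w ∉ banned_words
    · simp only [hb]
      by_cases hc : d.contains w = true
      · simp [hc]
      · simp only [hc, Bool.false_eq_true, if_false]
        rw [PySem.Dict.getD_of_not_contains d 0 (by simpa using hc)]
        simp
    · simp [hb]
  rw [hstep]

-- ===== VERDICT (by name: the statement is the Claim_ definition above) =====
theorem get_words_dict_spec : Claim_equal_get_words_dict := by
  intro words banned_words _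
  unfold Spec_get_words_dict get_words_dict_alt
  rw [get_words_dict_eq_counter_items, PySem.Dict.items_counter, ofList_filter]
  rw [show (PySem.Set.ofList words : List String) = PySem.List.dedup words from rfl]
  apply List.map_congr_left
  intro w hw
  have hp := (List.mem_filter.mp hw).2
  have hcnt := List.count_filter (p := fun w => decide (w ∉ banned_words)) (a := w) (l := words) hp
  rw [hcnt]
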